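-- pv_equiv track=rewrite | github.com/Daehyun-Bae/AlgoStudy | BaekJoon/bj_2512.py | solution
-- ===== SOURCE A (Python) =====
-- def calc_max(n, req, budget, q, i):
--     for j in range(i-1, -1, -1):
--         max_boundary = (budget - q[j]) // (n - j - 1)
--         if max_boundary > req[j]:
--             return max_boundary
--
--     return budget // n
--
-- def solution(n, req, budget):
--     req = sorted(req)
--     acc = 0
--     q = []
--
--     for i, r in enumerate(req):
--         acc += r
--         q.append(acc)
--         # Calc max boundary if cumulative sum is over budget
--         if acc > budget:
--             return calc_max(n, req, budget, q, i)
--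
--     return req[-1]
-- ===== SOURCE B (Python) =====
-- def solution(n, req, budget):
--     if sum(req) <= budget:
--         return max(req)
--     lo = budget // n
--     hi = max(req)
--     while hi - lo > 1:
--         mid = (lo + hi) // 2
--         if sum(min(r, mid) for r in req) <= budget:
--             lo = mid
--         else:
--             hi = mid
--     return lo
-- ===== Notes on version B (the rewrite author's own statement) =====
-- stated objective: faster
-- what changed: Replaces A's sort + prefix-sum array + backward boundary scan by a binary search on the answer cap: if sum(req) <= budget return max(req), otherwise bisect the largest X in [budget//n, max(req)] with sum(min(r, X) for r in req) <= budget; no sorting and no prefix array, just ~32 C-level sum/min passes (measured ~3x faster at the largest size).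
-- outside the precondition, e.g. on solution(3, [4, 4], 6): A returns 2, B returns 3; on solution(5, [12, -5, -3, 12, 1], -13): A returns -3, B returns -2; on solution(1, [5, 5], 7): A raises ZeroDivisionError, B returns 7
import Mathlib
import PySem

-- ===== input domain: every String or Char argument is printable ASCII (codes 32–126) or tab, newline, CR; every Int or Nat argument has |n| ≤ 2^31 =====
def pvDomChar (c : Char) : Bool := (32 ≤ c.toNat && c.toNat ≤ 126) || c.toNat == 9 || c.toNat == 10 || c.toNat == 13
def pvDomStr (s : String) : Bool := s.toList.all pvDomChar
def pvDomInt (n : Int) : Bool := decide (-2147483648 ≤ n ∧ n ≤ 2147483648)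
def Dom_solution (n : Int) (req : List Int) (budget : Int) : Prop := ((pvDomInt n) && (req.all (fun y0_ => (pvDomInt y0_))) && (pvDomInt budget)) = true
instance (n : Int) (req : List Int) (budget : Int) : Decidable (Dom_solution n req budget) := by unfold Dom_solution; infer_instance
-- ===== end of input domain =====

-- B replaces A's sort + prefix-sum array + backward boundary scan by a binary search on the
-- answer cap (largest X with sum(min(r,X)) ≤ budget); same results on the problem's domain.

-- ===== PORT A =====
-- calc_max's for-loop over range(i-1, -1, -1); q[j]/req[j] are in range whenever A runs
-- without an exception (guaranteed under Pre_solution), so pyGetD's default is never used.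
def pvCalcGo (n budget : Int) (req q : List Int) : List Int → Int
  | [] => PySem.Int.floordiv budget n
  | j :: js =>
    let mb := PySem.Int.floordiv (budget - PySem.List.pyGetD q j 0) (n - j - 1)
    if mb > PySem.List.pyGetD req j 0 then mb else pvCalcGo n budget req q js

def pvCalcMax (n : Int) (req : List Int) (budget : Int) (q : List Int) (i : Int) : Int :=
  pvCalcGo n budget req q (PySem.List.pyRange (i - 1) (-1) (-1))

-- solution's 'for i, r in enumerate(req)' loop with carried acc and q and early return
def pvSolGo (n budget : Int) (s : List Int) : List (Int × Int) → Int → List Int → Int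
  | [], _acc, _q => PySem.List.pyGetD s (-1) 0
  | (i, r) :: rest, acc, q =>
    let acc' := acc + r
    let q' := q ++ [acc']
    if acc' > budget then pvCalcMax n s budget q' i
    else pvSolGo n budget s rest acc' q'

def solution (n : Int) (req : List Int) (budget : Int) : Int :=
  let s := PySem.List.sorted req (fun x => x) false
  pvSolGo n budget s (PySem.List.enumerate s 0) 0 []

-- ===== PORT B =====
-- sum(min(r, x) for r in req)
def pvCost (req : List Int) (x : Int) : Int := (req.map (fun r => min r x)).sum

-- the 'while hi - lo > 1' bisection loop of Source B
def pvBSearch (req : List Int) (budget lo hi : Int) : Int :=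
  if _hgt : hi - lo > 1 then
    let mid := PySem.Int.floordiv (lo + hi) 2
    if pvCost req mid ≤ budget then pvBSearch req budget mid hi
    else pvBSearch req budget lo mid
  else lo
termination_by (hi - lo).toNat
decreasing_by
  all_goals
    have hm : PySem.Int.floordiv (lo + hi) 2 = (lo + hi) / 2 :=
      PySem.Int.floordiv_eq_ediv_of_pos (by norm_num)
    omega

def solution_alt (n : Int) (req : List Int) (budget : Int) : Int :=
  if req.sum ≤ budget then (PySem.List.max? req (fun x => x)).getD 0
  else pvBSearch req budget (PySem.Int.floordiv budget n)
        ((PySem.List.max? req (fun x => x)).getD 0)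

-- ===== PRECONDITION & SPEC =====
-- Pre_ = the problem's natural domain (BaekJoon 2512) plus every corner where A's value is
-- still the intended one.  It excludes exactly: req = [], where A raises IndexError;
-- sum(req) > budget with n ≠ len(req), where A's division terms (budget - q[j]) // (n-j-1)
-- are keyed to a wrong count (A may raise ZeroDivisionError or return a value tied to the
-- mismatched n); and budget < 0 unless sum(req) ≤ budget and min(req) ≤ budget, because on
-- a negative budget A's backward scan can fire on the very first prefix and then returns a
-- prefix-dependent value that is not the maximal feasible cap B computes.
def Pre_solution (n : Int) (req : List Int) (budget : Int) : Prop :=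
  req ≠ [] ∧ (req.sum ≤ budget ∨ (0 ≤ budget ∧ n = (req.length : Int))) ∧
    (budget < 0 → ∃ x ∈ req, x ≤ budget)
instance (n : Int) (req : List Int) (budget : Int) : Decidable (Pre_solution n req budget) := by
  unfold Pre_solution; infer_instance

def pvWitness_solution : Int × List Int × Int := (3, [3, 5, 10], 9)

def Spec_solution (n : Int) (req : List Int) (budget : Int) (out : Int) : Prop :=
  out = solution_alt n req budget
instance (n : Int) (req : List Int) (budget : Int) (out : Int) : Decidable (Spec_solution n req budget out) := by
  unfold Spec_solution; infer_instance

-- ===== CLAIM (what is proved, stated in full; the proofs are below) =====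
def Claim_equal_solution : Prop := ∀ (n : Int) (req : List Int) (budget : Int),
  Dom_solution n req budget → Pre_solution n req budget →
  Spec_solution n req budget (solution n req budget)

-- ===== LEMMAS AND PROOFS =====

theorem pv_cost_perm (xs ys : List Int) (x : Int) (h : xs.Perm ys) : pvCost xs x = pvCost ys x :=
  (h.map (fun r => min r x)).sum_eq

theorem pv_cost_mono (l : List Int) {x y : Int} (h : x ≤ y) : pvCost l x ≤ pvCost l y :=
  List.sum_le_sum fun _ _ => min_le_min le_rfl h

theorem pv_cost_le_mul (l : List Int) (x : Int) : pvCost l x ≤ (l.length : Int) * x := by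
  have h := List.sum_le_sum (l := l) (f := fun r => min r x) (g := fun _ => x)
    (fun r _ => min_le_right r x)
  simpa [List.map_const', mul_comm] using h

theorem pv_cost_eq_sum (l : List Int) (x : Int) (h : ∀ r ∈ l, r ≤ x) : pvCost l x = l.sum := by
  unfold pvCost
  rw [List.map_congr_left (fun r hr => min_eq_left (h r hr)), List.map_id']

theorem pv_cost_eq_mul (l : List Int) (x : Int) (h : ∀ r ∈ l, x ≤ r) :
    pvCost l x = (l.length : Int) * x := by
  unfold pvCost
  rw [List.map_congr_left (fun r hr => min_eq_right (h r hr))]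
  simp [List.map_const', mul_comm]

theorem pv_mul_le_cost (l : List Int) (x c : Int) (hc : c ≤ x) (h : ∀ r ∈ l, c ≤ r) :
    (l.length : Int) * c ≤ pvCost l x := by
  have h2 := List.sum_le_sum (l := l) (f := fun _ => c) (g := fun r => min r x)
    (fun r hr => le_min (h r hr) hc)
  simpa [List.map_const', mul_comm] using h2

theorem pv_cost_append (a b : List Int) (x : Int) : pvCost (a ++ b) x = pvCost a x + pvCost b x := by
  simp [pvCost]

theorem pv_good_unique (l : List Int) (B a b : Int)
    (h1 : pvCost l a ≤ B) (h2 : B < pvCost l (a + 1))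
    (h3 : pvCost l b ≤ B) (h4 : B < pvCost l (b + 1)) : a = b := by
  by_contra hne
  rcases lt_or_gt_of_ne hne with hlt | hlt
  · have := pv_cost_mono l (by omega : a + 1 ≤ b)
    omega
  · have := pv_cost_mono l (by omega : b + 1 ≤ a)
    omega

theorem pv_bsearch_good (l : List Int) (B : Int) : ∀ (m : Nat) (lo hi : Int),
    (hi - lo).toNat = m → pvCost l lo ≤ B → B < pvCost l hi → lo < hi →
    pvCost l (pvBSearch l B lo hi) ≤ B ∧ B < pvCost l (pvBSearch l B lo hi + 1) := by
  intro m
  induction m using Nat.strong_induction_on with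
  | _ m ih =>
    intro lo hi hm hlo hhi hlt
    rw [pvBSearch]
    by_cases hgt : hi - lo > 1
    · rw [dif_pos hgt]
      have hmid : PySem.Int.floordiv (lo + hi) 2 = (lo + hi) / 2 :=
        PySem.Int.floordiv_eq_ediv_of_pos (by norm_num)
      by_cases hc : pvCost l (PySem.Int.floordiv (lo + hi) 2) ≤ B
      · simp only [hc, if_pos]
        exact ih (hi - PySem.Int.floordiv (lo + hi) 2).toNat (by omega)
          (PySem.Int.floordiv (lo + hi) 2) hi rfl hc hhi (by omega)
      · simp only [hc, if_false]
        exact ih (PySem.Int.floordiv (lo + hi) 2 - lo).toNat (by omega)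
          lo (PySem.Int.floordiv (lo + hi) 2) rfl hlo (by omega) (by omega)
    · rw [dif_neg hgt]
      have : hi = lo + 1 := by omega
      subst this
      exact ⟨hlo, hhi⟩

theorem pv_sorted_getD_mono (s : List Int) (hpw : s.Pairwise (· ≤ ·)) (p q : Nat)
    (hpq : p ≤ q) (hq : q < s.length) : s.getD p 0 ≤ s.getD q 0 := by
  rw [List.getD_eq_getElem s 0 (lt_of_le_of_lt hpq hq), List.getD_eq_getElem s 0 hq]
  rcases Nat.lt_or_ge p q with h | h
  · exact List.pairwise_iff_getElem.mp hpw p q _ _ h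
  · have : p = q := by omega
    subst this; rfl

theorem pv_take_le (s : List Int) (hpw : s.Pairwise (· ≤ ·)) (k : Nat) (hk : k < s.length) :
    ∀ r ∈ s.take (k + 1), r ≤ s.getD k 0 := by
  intro r hr
  obtain ⟨m, hm, rfl⟩ := List.mem_iff_getElem.mp hr
  have hm' : m < s.length := by
    have := List.length_take (i := k + 1) (l := s); omega
  rw [List.getElem_take, List.getD_eq_getElem s 0 hk]
  have hmk : m ≤ k := by have := List.length_take (i := k + 1) (l := s); omega
  have h := pv_sorted_getD_mono s hpw m k hmk hk
  rw [List.getD_eq_getElem s 0 hm', List.getD_eq_getElem s 0 hk] at h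
  exact h

theorem pv_drop_ge (s : List Int) (hpw : s.Pairwise (· ≤ ·)) (k : Nat) (hk : k < s.length) :
    ∀ r ∈ s.drop k, s.getD k 0 ≤ r := by
  intro r hr
  obtain ⟨m, hm, rfl⟩ := List.mem_iff_getElem.mp hr
  rw [List.getElem_drop, List.getD_eq_getElem s 0 hk]
  have hkm : k + m < s.length := by have := List.length_drop (i := k) (l := s); omega
  have h := pv_sorted_getD_mono s hpw k (k + m) (by omega) hkm
  rw [List.getD_eq_getElem s 0 hk, List.getD_eq_getElem s 0 hkm] at h
  exact h

theorem pv_calcGo_good (s q : List Int) (n budget : Int) (i : Nat)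
    (hn : (s.length : Int) = n) (hpw : s.Pairwise (· ≤ ·)) (hi : i < s.length)
    (hq : ∀ k : Nat, k < i → PySem.List.pyGetD q (k : Int) 0 = (s.take (k + 1)).sum) :
    ∀ j : Nat, j ≤ i →
      (∀ X : Int, s.getD j 0 ≤ X → budget < pvCost s (X + 1)) →
      pvCost s (pvCalcGo n budget s q (PySem.List.pyRange ((j : Int) - 1) (-1) (-1))) ≤ budget ∧
      budget < pvCost s (pvCalcGo n budget s q (PySem.List.pyRange ((j : Int) - 1) (-1) (-1)) + 1) := by
  have hn0 : (0 : Int) < n := by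
    have h0 : (0 : Int) < (s.length : Int) := by exact_mod_cast Nat.pos_of_ne_zero (by omega)
    omega
  intro j
  induction j with
  | zero =>
    intro _ hinv
    rw [show ((0 : Nat) : Int) - 1 = (-1 : Int) by norm_num,
        PySem.List.pyRange_neg_one_eq_nil (by norm_num)]
    show pvCost s (PySem.Int.floordiv budget n) ≤ budget ∧
      budget < pvCost s (PySem.Int.floordiv budget n + 1)
    set m := PySem.Int.floordiv budget n with hmdef
    constructor
    · have h1 := pv_cost_le_mul s m
      have h2 : m * n ≤ budget := (PySem.Int.le_floordiv_iff_mul_le hn0).mp le_rfl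
      calc pvCost s m ≤ (s.length : Int) * m := h1
        _ = m * n := by rw [hn]; ring
        _ ≤ budget := h2
    · by_cases hX : s.getD 0 0 ≤ m
      · exact hinv m hX
      · push_neg at hX
        have hall : ∀ r ∈ s, m + 1 ≤ r := by
          intro r hr
          obtain ⟨k, hk, rfl⟩ := List.mem_iff_getElem.mp hr
          have h := pv_sorted_getD_mono s hpw 0 k (Nat.zero_le k) hk
          rw [List.getD_eq_getElem s 0 hk] at h
          omega
        rw [pv_cost_eq_mul s (m + 1) hall]
        have h3 : budget < (m + 1) * n := (PySem.Int.floordiv_lt_iff_lt_mul hn0).mp (by omega)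
        rw [hn]; linarith [h3]
  | succ j ihj =>
    intro hj hinv
    have hji : j < i := hj
    have hjN : j + 1 < s.length := lt_of_le_of_lt hj hi
    rw [show ((j + 1 : Nat) : Int) - 1 = ((j : Nat) : Int) by push_cast; ring,
        PySem.List.pyRange_neg_one_cons (by omega : (-1 : Int) < ((j : Nat) : Int))]
    simp only [pvCalcGo]
    rw [hq j hji, PySem.List.pyGetD_natCast]
    have hts : s.take (j + 1) ++ s.drop (j + 1) = s := List.take_append_drop _ s
    have hsplit : ∀ X, pvCost s X = pvCost (s.take (j + 1)) X + pvCost (s.drop (j + 1)) X :=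
      fun X => by rw [← pv_cost_append, hts]
    have htsum : ∀ X, s.getD j 0 < X → pvCost (s.take (j + 1)) X = (s.take (j + 1)).sum :=
      fun X hX => pv_cost_eq_sum _ X
        (fun r hr => le_of_lt (lt_of_le_of_lt (pv_take_le s hpw j (by omega) r hr) hX))
    have hulen : ((s.drop (j + 1)).length : Int) = n - ((j : Nat) : Int) - 1 := by
      have := List.length_drop (i := j + 1) (l := s); omega
    have hdpos : (0 : Int) < n - ((j : Nat) : Int) - 1 := by omega
    set sj := s.getD j 0 with hsjdef
    set mb := PySem.Int.floordiv (budget - (s.take (j + 1)).sum) (n - ((j : Nat) : Int) - 1) with hmbdef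
    have hb1 : mb * (n - ((j : Nat) : Int) - 1) ≤ budget - (s.take (j + 1)).sum :=
      (PySem.Int.le_floordiv_iff_mul_le hdpos).mp le_rfl
    by_cases hsucc : mb > sj
    · rw [if_pos hsucc]
      constructor
      · rw [hsplit mb, htsum mb hsucc]
        have h5 := pv_cost_le_mul (s.drop (j + 1)) mb
        rw [hulen] at h5
        nlinarith [hb1, h5]
      · by_cases hcc : s.getD (j + 1) 0 ≤ mb
        · exact hinv mb hcc
        · push_neg at hcc
          rw [hsplit (mb + 1), htsum (mb + 1) (by omega),
              pv_cost_eq_mul (s.drop (j + 1)) (mb + 1)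
                (fun r hr => by have := pv_drop_ge s hpw (j + 1) hjN r hr; omega),
              hulen]
          have hb2 : budget - (s.take (j + 1)).sum < (mb + 1) * (n - ((j : Nat) : Int) - 1) :=
            (PySem.Int.floordiv_lt_iff_lt_mul hdpos).mp (by omega)
          nlinarith [hb2]
    · rw [if_neg hsucc]
      push_neg at hsucc
      apply ihj (by omega)
      intro X hX
      by_cases hcc : s.getD (j + 1) 0 ≤ X
      · exact hinv X hcc
      · push_neg at hcc
        rw [hsplit (X + 1), htsum (X + 1) (by omega),
            pv_cost_eq_mul (s.drop (j + 1)) (X + 1)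
              (fun r hr => by have := pv_drop_ge s hpw (j + 1) hjN r hr; omega),
            hulen]
        have h3 : budget - (s.take (j + 1)).sum < (sj + 1) * (n - ((j : Nat) : Int) - 1) :=
          (PySem.Int.floordiv_lt_iff_lt_mul hdpos).mp (by omega)
        have h4 : (sj + 1) * (n - ((j : Nat) : Int) - 1) ≤ (X + 1) * (n - ((j : Nat) : Int) - 1) :=
          mul_le_mul_of_nonneg_right (by omega) (by omega)
        linarith

theorem pv_solGo_spec (n budget : Int) (s : List Int)
    (hpw : s.Pairwise (· ≤ ·)) :
    ∀ (rest done q : List Int), s = done ++ rest →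
      (done.sum ≤ budget ∨ (done = [] ∧ ∃ x ∈ s, x ≤ budget)) →
      q.length = done.length →
      (∀ k : Nat, k < done.length → PySem.List.pyGetD q (k : Int) 0 = (s.take (k + 1)).sum) →
      (s.sum ≤ budget →
        pvSolGo n budget s (PySem.List.enumerate rest (done.length : Int)) done.sum q
          = PySem.List.pyGetD s (-1) 0) ∧
      (budget < s.sum → (s.length : Int) = n →
        pvCost s (pvSolGo n budget s (PySem.List.enumerate rest (done.length : Int)) done.sum q) ≤ budget ∧
        budget < pvCost s (pvSolGo n budget s (PySem.List.enumerate rest (done.length : Int)) done.sum q + 1)) := by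
  intro rest
  induction rest with
  | nil =>
    intro done q hs hacc _hql _hq
    have hsum : s.sum = done.sum := by rw [hs, List.append_nil]
    constructor
    · intro _; rfl
    · intro hlt _
      rcases hacc with hacc | ⟨hd, x, hx, hxb⟩
      · omega
      · rw [hs, hd] at hx
        exact absurd hx (List.not_mem_nil)
  | cons r rest' ih =>
    intro done q hs hacc hql hq
    have henum : PySem.List.enumerate (r :: rest') ((done.length : Nat) : Int)
        = (((done.length : Nat) : Int), r) :: PySem.List.enumerate rest' (((done.length : Nat) : Int) + 1) := rfl
    rw [henum]
    simp only [pvSolGo]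
    have hlen : s.length = done.length + 1 + rest'.length := by
      rw [hs]; simp; omega
    have hiN : done.length < s.length := by omega
    have htake : s.take (done.length + 1) = done ++ [r] := by
      rw [hs, show done ++ r :: rest' = (done ++ [r]) ++ rest' by simp]
      exact List.take_left' (by simp)
    have hdrop : s.drop (done.length + 1) = rest' := by
      rw [hs, show done ++ r :: rest' = (done ++ [r]) ++ rest' by simp]
      exact List.drop_left' (by simp)
    have hq' : ∀ k : Nat, k < done.length + 1 →
        PySem.List.pyGetD (q ++ [done.sum + r]) (k : Int) 0 = (s.take (k + 1)).sum := by
      intro k hk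
      rw [PySem.List.pyGetD_natCast]
      rcases Nat.lt_or_ge k done.length with hlt | hge
      · rw [List.getD_append q [done.sum + r] 0 k (by omega)]
        have h := hq k hlt
        rw [PySem.List.pyGetD_natCast] at h
        exact h
      · have hki : k = done.length := by omega
        subst hki
        rw [List.getD_eq_getElem _ 0 (by simp; omega),
            List.getElem_concat_length (by omega), htake]
        simp
    have hge0 : ∀ x ∈ s, s.getD 0 0 ≤ x := by
      intro x hx
      obtain ⟨k, hk, rfl⟩ := List.mem_iff_getElem.mp hx
      have h := pv_sorted_getD_mono s hpw 0 k (Nat.zero_le k) hk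
      rwa [List.getD_eq_getElem s 0 hk] at h
    by_cases hex : done.sum + r > budget
    · rw [if_pos hex]
      have hacc : done.sum ≤ budget := by
        rcases hacc with hacc | ⟨hd, x, hx, hxb⟩
        · exact hacc
        · exfalso
          subst hd
          have hs0 : s.getD 0 0 = r := by
            rw [hs, List.nil_append, List.getD_cons_zero]
          have := hge0 x hx
          simp at hex
          omega
      have hsir : s.getD done.length 0 = r := by
        rw [hs, List.getD_append_right done (r :: rest') 0 done.length le_rfl]
        simp
      have hdone_le : ∀ x ∈ done, x ≤ r := by
        intro x hx
        obtain ⟨m, hm, rfl⟩ := List.mem_iff_getElem.mp hx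
        have hms : m < s.length := by omega
        have h1 := pv_sorted_getD_mono s hpw m done.length (by omega) hiN
        rw [hsir, List.getD_eq_getElem s 0 hms] at h1
        simp only [hs] at h1
        rwa [List.getElem_append_left hm] at h1
      have hr1 : 1 ≤ r := by omega
      have hrestge : ∀ x ∈ rest', r ≤ x := by
        intro x hx
        have hlt : done.length + 1 < s.length := by
          have : 0 < rest'.length := List.length_pos_of_mem hx
          omega
        have h1 := pv_drop_ge s hpw (done.length + 1) hlt x (by rw [hdrop]; exact hx)
        have h2 := pv_sorted_getD_mono s hpw done.length (done.length + 1) (by omega) hlt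
        rw [hsir] at h2; omega
      have hsum : s.sum = done.sum + (r + rest'.sum) := by rw [hs]; simp
      have hrest0 : 0 ≤ rest'.sum :=
        List.sum_nonneg (fun x hx => le_trans (by omega) (hrestge x hx))
      have hbs : budget < s.sum := by omega
      constructor
      · intro h; omega
      · intro _ hn
        show pvCost s (pvCalcMax n s budget (q ++ [done.sum + r]) ((done.length : Nat) : Int)) ≤ budget ∧ _
        unfold pvCalcMax
        apply pv_calcGo_good s (q ++ [done.sum + r]) n budget done.length hn hpw hiN
          (fun k hk => hq' k (by omega)) done.length le_rfl
        intro X hX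
        rw [hsir] at hX
        have hsplit : pvCost s (X + 1) = pvCost done (X + 1) + pvCost (r :: rest') (X + 1) := by
          rw [hs, pv_cost_append]
        have hcd : pvCost done (X + 1) = done.sum :=
          pv_cost_eq_sum done (X + 1) (fun x hx => by have := hdone_le x hx; omega)
        have hcu := pv_mul_le_cost (r :: rest') (X + 1) r (by omega)
          (by intro x hx
              rcases List.mem_cons.mp hx with h | h
              · omega
              · exact hrestge x h)
        have hlr : ((r :: rest').length : Int) * r = r + (rest'.length : Int) * r := by
          simp [List.length_cons]; ring
        have hLr : 0 ≤ (rest'.length : Int) * r :=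
          mul_nonneg (by positivity) (by omega)
        rw [hsplit, hcd]
        rw [hlr] at hcu
        omega
    · rw [if_neg hex]
      have hacc' : (done ++ [r]).sum = done.sum + r := by simp
      have H := ih (done ++ [r]) (q ++ [done.sum + r])
        (by rw [hs]; simp)
        (by rw [hacc']; left; omega)
        (by simp [hql])
        (by intro k hk
            simp only [List.length_append, List.length_cons, List.length_nil] at hk
            exact hq' k (by omega))
      rw [hacc'] at H
      have hcast : (((done ++ [r]).length : Nat) : Int) = ((done.length : Nat) : Int) + 1 := by
        simp
      rw [hcast] at H
      exact H

theorem pv_last_eq_max (req : List Int) (h : req ≠ []) :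
    PySem.List.pyGetD (PySem.List.sorted req (fun x => x) false) (-1) 0
      = (PySem.List.max? req (fun x => x)).getD 0 := by
  have hsne : PySem.List.sorted req (fun x => x) false ≠ [] := by
    intro h0
    exact h ((PySem.List.sorted_eq_nil_iff req (fun x => x) false).mp h0)
  obtain ⟨m, hm⟩ : ∃ m, PySem.List.max? req (fun x => x) = some m := by
    cases hmax : PySem.List.max? req (fun x => x) with
    | none => exact absurd ((PySem.List.max?_eq_none_iff req (fun x => x)).mp hmax) h
    | some m => exact ⟨m, rfl⟩
  rw [hm, PySem.List.pyGetD_neg_one _ 0 hsne]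
  show (PySem.List.sorted req (fun x => x) false).getLast hsne = m
  have h1 : (PySem.List.sorted req (fun x => x) false).getLast hsne ≤ m :=
    PySem.List.max?_isMax hm _
      ((PySem.List.mem_sorted _ _ _ _).mp (List.getLast_mem hsne))
  have h2 : m ≤ (PySem.List.sorted req (fun x => x) false).getLast hsne := by
    have hmem : m ∈ PySem.List.sorted req (fun x => x) false :=
      (PySem.List.mem_sorted _ _ _ _).mpr (PySem.List.max?_mem hm)
    obtain ⟨k, hk, hkm⟩ := List.mem_iff_getElem.mp hmem
    rw [List.getLast_eq_getElem]
    calc m = (PySem.List.sorted req (fun x => x) false)[k] := hkm.symm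
      _ ≤ (PySem.List.sorted req (fun x => x) false)[(PySem.List.sorted req (fun x => x) false).length - 1] :=
        PySem.List.sorted_id_getElem_mono req (by omega) (by omega)
  exact le_antisymm h1 h2

-- ===== VERDICT (by name: the statement is the Claim_ definition above) =====
theorem solution_spec : Claim_equal_solution := by
  intro n req budget _hdom hpre
  obtain ⟨hne, hdisj, hwneg⟩ := hpre
  unfold Spec_solution
  show solution n req budget = solution_alt n req budget
  unfold solution solution_alt
  set s := PySem.List.sorted req (fun x => x) false with hsdef
  have hperm : s.Perm req := PySem.List.sorted_perm req (fun x => x) false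
  have hpw : s.Pairwise (· ≤ ·) := PySem.List.sorted_pairwise req (fun x => x)
  have hlen : s.length = req.length := hperm.length_eq
  have hsum : s.sum = req.sum := hperm.sum_eq
  have H := pv_solGo_spec n budget s hpw s [] []
    (by simp)
    (by
      by_cases hb : 0 ≤ budget
      · left; simpa using hb
      · right
        rw [Int.not_le] at hb
        refine ⟨rfl, ?_⟩
        obtain ⟨x, hx, hxb⟩ := hwneg hb
        exact ⟨x, (PySem.List.mem_sorted _ _ _ _).mpr hx, hxb⟩)
    rfl (by intro k hk; exact absurd hk (Nat.not_lt_zero k))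
  simp only [List.length_nil, Nat.cast_zero, List.sum_nil] at H
  by_cases hcase : req.sum ≤ budget
  · rw [if_pos hcase]
    rw [H.1 (by omega)]
    exact pv_last_eq_max req hne
  · rw [if_neg hcase]
    have hn : n = (req.length : Int) := by
      rcases hdisj with hsb | ⟨_, hn⟩
      · exact absurd hsb hcase
      · exact hn
    have hn' : (s.length : Int) = n := by rw [hlen]; omega
    have hGoodA := H.2 (by omega) hn' 
    obtain ⟨mv, hmv⟩ : ∃ m, PySem.List.max? req (fun x => x) = some m := by
      cases hmax : PySem.List.max? req (fun x => x) with
      | none => exact absurd ((PySem.List.max?_eq_none_iff req (fun x => x)).mp hmax) hne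
      | some m => exact ⟨m, rfl⟩
    rw [hmv]
    show pvSolGo n budget s (PySem.List.enumerate s 0) 0 []
      = pvBSearch req budget (PySem.Int.floordiv budget n) ((some mv).getD 0)
    have hMv : (Option.getD (some mv) 0) = mv := rfl
    rw [hMv]
    have hn0 : (0 : Int) < n := by
      have : 0 < req.length := List.length_pos_iff.mpr hne
      omega
    have hcostM : pvCost req mv = req.sum :=
      pv_cost_eq_sum req mv (fun r hr => PySem.List.max?_isMax hmv r hr)
    have hcostlo : pvCost req (PySem.Int.floordiv budget n) ≤ budget := by
      have h1 := pv_cost_le_mul req (PySem.Int.floordiv budget n)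
      have h2 : (PySem.Int.floordiv budget n) * n ≤ budget :=
        (PySem.Int.le_floordiv_iff_mul_le hn0).mp le_rfl
      have h3 : ((req.length : Int)) * (PySem.Int.floordiv budget n)
          = (PySem.Int.floordiv budget n) * n := by rw [hn]; ring
      linarith
    have hcosthi : budget < pvCost req mv := by omega
    have hlt : PySem.Int.floordiv budget n < mv := by
      by_contra hcon
      push_neg at hcon
      have := pv_cost_mono req hcon
      omega
    have hGoodB := pv_bsearch_good req budget (mv - PySem.Int.floordiv budget n).toNat
      (PySem.Int.floordiv budget n) mv rfl hcostlo hcosthi hlt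
    have hca : ∀ X, pvCost s X = pvCost req X := fun X => pv_cost_perm s req X hperm
    exact pv_good_unique req budget _ _
      (by rw [← hca]; exact hGoodA.1) (by rw [← hca]; exact hGoodA.2)
      hGoodB.1 hGoodB.2
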